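-- pv_equiv track=rewrite | github.com/chut-ai/maml | data/office31.py | squeeze
-- ===== SOURCE A (Python) =====
-- def squeeze(labels):
--
--     items = []
--     for label in labels:
--         if label not in items:
--             items.append(label)
--
--     items = sorted(items)
--
--     squeezed = []
--     for label in labels:
--         squeezed.append(items.index(label))
--     return squeezed
-- ===== SOURCE B (Python) =====
-- def squeeze(labels):
--     uniques = []
--     for x in sorted(labels):
--         if not uniques or x != uniques[-1]:
--             uniques.append(x)
--     rank = {}
--     for i, x in enumerate(uniques):
--         rank[x] = i
--     return [rank[x] for x in labels]
-- ===== Notes on version B (the rewrite author's own statement) =====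
-- stated objective: faster
-- what changed: Replaces the O(n*u) membership-test dedup and per-element linear list.index with a sort + adjacent-comparison dedup and a rank dictionary built once, looked up in O(1).
import Mathlib
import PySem

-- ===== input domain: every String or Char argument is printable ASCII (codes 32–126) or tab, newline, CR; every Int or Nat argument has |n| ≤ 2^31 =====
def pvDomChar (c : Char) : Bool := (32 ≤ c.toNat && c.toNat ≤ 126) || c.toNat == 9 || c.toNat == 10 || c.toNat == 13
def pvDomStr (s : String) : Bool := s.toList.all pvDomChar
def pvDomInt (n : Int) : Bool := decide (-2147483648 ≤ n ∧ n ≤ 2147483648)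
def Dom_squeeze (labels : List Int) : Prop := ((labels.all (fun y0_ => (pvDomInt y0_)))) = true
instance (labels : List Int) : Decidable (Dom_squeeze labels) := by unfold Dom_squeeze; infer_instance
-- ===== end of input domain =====

-- B replaces A's O(n·u) membership-test dedup and per-element linear list.index by
-- sorting once, deduplicating adjacent duplicates, and answering lookups from a rank
-- dictionary built once (objective: faster).

-- ===== PORT A =====
def squeeze (labels : List Int) : List Int :=
  -- items = []; for label in labels: if label not in items: items.append(label)
  let items := labels.foldl (fun acc label => if label ∈ acc then acc else acc ++ [label]) []
  -- items = sorted(items)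
  let items := PySem.List.sorted items (fun x => x) false
  -- squeezed = []; for label in labels: squeezed.append(items.index(label))
  -- items.index(label) always succeeds (label ∈ items); index? is some there, getD 0 is never the default
  labels.foldl (fun sq label => sq ++ [(((PySem.List.index? items label).getD 0 : Nat) : Int)]) []

-- ===== PORT B =====
def squeeze_alt (labels : List Int) : List Int :=
  -- uniques = []; for x in sorted(labels): if not uniques or x != uniques[-1]: uniques.append(x)
  -- ('not uniques or x != uniques[-1]' is exactly 'uniques.getLast? ≠ some x')
  let uniques := (PySem.List.sorted labels (fun x => x) false).foldl
      (fun acc x => if acc.getLast? ≠ some x then acc ++ [x] else acc) []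
  -- rank = {}; for i, x in enumerate(uniques): rank[x] = i
  let rank := (PySem.List.enumerate uniques).foldl
      (fun d p => d.insert p.2 p.1) (PySem.Dict.mk ([] : List (Int × Int)))
  -- [rank[x] for x in labels]  (x is always a key of rank; getD 0 is never the default)
  labels.map (fun x => rank.getD x 0)

-- ===== PRECONDITION & SPEC =====
def Spec_squeeze (labels : List Int) (out : List Int) : Prop := out = squeeze_alt labels
instance (labels : List Int) (out : List Int) : Decidable (Spec_squeeze labels out) := by unfold Spec_squeeze; infer_instance

-- ===== CLAIM (what is proved, stated in full; the proofs are below) =====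
def Claim_equal_squeeze : Prop := ∀ (labels : List Int), Dom_squeeze labels → Spec_squeeze labels (squeeze labels)

-- ===== LEMMAS AND PROOFS =====

-- A's first loop is exactly PySem.Set.ofList (first-occurrence dedup).
lemma aDedup_eq_ofList (labels : List Int) :
    labels.foldl (fun acc label => if label ∈ acc then acc else acc ++ [label]) [] =
      PySem.Set.ofList labels := by
  have h : (fun (acc : List Int) label => if label ∈ acc then acc else acc ++ [label]) =
      PySem.Set.add := by
    funext s x
    simp [PySem.Set.add, PySem.Set.contains]
  rw [h]; rfl

-- The adjacent-comparison scan over a ≤-sorted list: strictly increasing, same members.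
lemma scan_dedup (s : List Int) : ∀ (acc : List Int), acc.Pairwise (· < ·) →
    s.Pairwise (· ≤ ·) → (∀ a ∈ acc, ∀ y ∈ s, a ≤ y) →
    (s.foldl (fun acc x => if acc.getLast? ≠ some x then acc ++ [x] else acc) acc).Pairwise (· < ·) ∧
    (∀ z, z ∈ s.foldl (fun acc x => if acc.getLast? ≠ some x then acc ++ [x] else acc) acc ↔
      z ∈ acc ∨ z ∈ s) := by
  induction s with
  | nil => intro acc hacc _ _; exact ⟨hacc, fun z => by simp⟩
  | cons x t ih =>
    intro acc hacc hs hle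
    have hst : t.Pairwise (· ≤ ·) := hs.sublist (List.sublist_cons_self x t)
    have hxt : ∀ y ∈ t, x ≤ y := (List.pairwise_cons.mp hs).1
    simp only [List.foldl_cons]
    by_cases hg : acc.getLast? ≠ some x
    · simp only [if_pos hg]
      -- every element of acc is < x
      have hlt : ∀ a ∈ acc, a < x := by
        intro a ha
        have hax : a ≤ x := hle a ha x (List.mem_cons_self)
        rcases eq_or_lt_of_le hax with heq | h; swap; · exact h
        exfalso
        obtain ⟨l, hlast⟩ : ∃ b, acc.getLast? = some b := by
          cases hacc' : acc.getLast? with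
          | none => exact absurd (List.getLast?_eq_none_iff.mp hacc') (List.ne_nil_of_mem ha)
          | some b => exact ⟨b, rfl⟩
        obtain ⟨ys, hys⟩ := List.getLast?_eq_some_iff.mp hlast
        -- a ≤ l
        have hal : a ≤ l := by
          rw [hys] at ha hacc
          rcases List.mem_append.mp ha with h' | h'
          · exact le_of_lt ((List.pairwise_append.mp hacc).2.2 a h' l (List.mem_singleton_self l))
          · simp at h'; omega
        have hlx : l ≤ x := hle l (by rw [hys]; simp) x (List.mem_cons_self)
        have hlxx : l = x := le_antisymm hlx (heq ▸ hal)
        exact hg (by rw [hlast, hlxx])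
      have hacc' : (acc ++ [x]).Pairwise (· < ·) := by
        rw [List.pairwise_append]
        exact ⟨hacc, List.pairwise_singleton _ _, fun a ha b hb => by simp at hb; subst hb; exact hlt a ha⟩
      have hle' : ∀ a ∈ acc ++ [x], ∀ y ∈ t, a ≤ y := by
        intro a ha y hy
        rcases List.mem_append.mp ha with h' | h'
        · exact hle a h' y (List.mem_cons_of_mem x hy)
        · simp at h'; subst h'; exact hxt y hy
      obtain ⟨h1, h2⟩ := ih (acc ++ [x]) hacc' hst hle'
      refine ⟨h1, fun z => ?_⟩
      rw [h2 z]
      simp [or_assoc, List.mem_append]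
    · simp only [if_neg hg]
      replace hg : acc.getLast? = some x := not_not.mp hg
      have hxacc : x ∈ acc := by
        obtain ⟨ys, hys⟩ := List.getLast?_eq_some_iff.mp hg
        rw [hys]; simp
      have hle' : ∀ a ∈ acc, ∀ y ∈ t, a ≤ y :=
        fun a ha y hy => hle a ha y (List.mem_cons_of_mem x hy)
      obtain ⟨h1, h2⟩ := ih acc hacc hst hle'
      refine ⟨h1, fun z => ?_⟩
      rw [h2 z]
      constructor
      · rintro (h | h)
        · exact Or.inl h
        · exact Or.inr (List.mem_cons_of_mem x h)
      · rintro (h | h)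
        · exact Or.inl h
        · rcases List.mem_cons.mp h with rfl | h'
          · exact Or.inl hxacc
          · exact Or.inr h'

-- abbreviation used only by the proofs
def bUniques (labels : List Int) : List Int :=
  (PySem.List.sorted labels (fun x => x) false).foldl
    (fun acc x => if acc.getLast? ≠ some x then acc ++ [x] else acc) []

lemma bUniques_pairwise_mem (labels : List Int) :
    (bUniques labels).Pairwise (· < ·) ∧ (∀ z, z ∈ bUniques labels ↔ z ∈ labels) := by
  have hs : (PySem.List.sorted labels (fun x => x) false).Pairwise (· ≤ ·) :=
    PySem.List.sorted_pairwise labels (fun x => x)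
  obtain ⟨h1, h2⟩ := scan_dedup (PySem.List.sorted labels (fun x => x) false) []
    (List.Pairwise.nil) hs (by simp)
  refine ⟨h1, fun z => ?_⟩
  rw [bUniques, h2 z]
  simp [PySem.List.mem_sorted]

-- B's uniques list IS A's sorted deduplicated items list.
lemma sorted_ofList_eq_bUniques (labels : List Int) :
    PySem.List.sorted (PySem.Set.ofList labels) (fun x => x) false = bUniques labels := by
  obtain ⟨hpw, hmem⟩ := bUniques_pairwise_mem labels
  apply PySem.List.sorted_eq_of_perm_of_pairwise_lt
  · rw [List.perm_ext_iff_of_nodup (hpw.imp fun h => ne_of_lt h) (PySem.Set.nodup_ofList labels)]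
    intro a
    rw [hmem a, PySem.Set.mem_ofList]
  · exact hpw

-- idxOf? returns some idxOf on members.
lemma idxOf?_eq_some_idxOf (xs : List Int) (x : Int) (h : x ∈ xs) :
    List.idxOf? x xs = some (List.idxOf x xs) := by
  induction xs with
  | nil => cases h
  | cons a t ih =>
    by_cases hx : x = a
    · subst hx; simp [List.idxOf?_cons]
    · rcases List.mem_cons.mp h with h' | h'
      · exact absurd h' hx
      · rw [List.idxOf_cons_ne _ (Ne.symm hx), List.idxOf?_cons]
        simp [Ne.symm hx, ih h', Nat.succ_eq_add_one]

-- folding inserts whose keys all differ from a leaves get? a unchanged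
lemma get?_foldl_insert_of_ne (ps : List (Int × Int)) :
    ∀ (d : PySem.Dict Int Int) (a : Int), (∀ p ∈ ps, p.2 ≠ a) →
    (ps.foldl (fun d p => d.insert p.2 p.1) d).get? a = d.get? a := by
  induction ps with
  | nil => intro d a _; rfl
  | cons p t ih =>
    intro d a hne
    simp only [List.foldl_cons]
    rw [ih _ a (fun q hq => hne q (List.mem_cons_of_mem p hq))]
    exact PySem.Dict.get?_insert_of_ne d _ (Ne.symm (hne p List.mem_cons_self))

-- the rank dictionary maps each member of a nodup list to its index
lemma rank_get? (u : List Int) : ∀ (start : Int) (d : PySem.Dict Int Int), u.Nodup →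
    ∀ x ∈ u,
    ((PySem.List.enumerate u start).foldl (fun d p => d.insert p.2 p.1) d).get? x =
      some (start + (List.idxOf x u : Int)) := by
  induction u with
  | nil => intro _ _ _ x hx; cases hx
  | cons a t ih =>
    intro start d hnd x hx
    have hat : a ∉ t := (List.nodup_cons.mp hnd).1
    rw [show PySem.List.enumerate (a :: t) start = (start, a) :: PySem.List.enumerate t (start + 1) from rfl,
      List.foldl_cons]
    by_cases hxa : x = a
    · subst hxa
      rw [get?_foldl_insert_of_ne]
      · rw [PySem.Dict.get?_insert_self]
        simp [List.idxOf_cons_self]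
      · rintro ⟨i, y⟩ hp heq
        obtain ⟨k, hk, hpy⟩ := (PySem.List.mem_enumerate_iff t (start + 1) (i, y)).mp hp
        have : y = t[k] := congrArg Prod.snd hpy
        exact hat (heq ▸ (this ▸ List.getElem_mem _ : y ∈ t))
    · have hxt : x ∈ t := List.mem_of_ne_of_mem hxa hx
      rw [ih (start + 1) (d.insert a start) (List.nodup_cons.mp hnd).2 x hxt]
      rw [List.idxOf_cons_ne _ (Ne.symm hxa)]
      push_cast [Nat.succ_eq_add_one]
      ring_nf

lemma getD_eq_get? (d : PySem.Dict Int Int) (k v : Int) :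
    d.getD k v = (d.get? k).getD v := by
  simp [PySem.Dict.getD, PySem.Dict.get?]

-- ===== VERDICT (by name: the statement is the Claim_ definition above) =====
theorem squeeze_spec : Claim_equal_squeeze := by
  intro labels _
  simp only [Spec_squeeze, squeeze, squeeze_alt]
  rw [aDedup_eq_ofList, sorted_ofList_eq_bUniques]
  rw [PySem.List.foldl_append_singleton_eq_map
    (fun label => (((PySem.List.index? (bUniques labels) label).getD 0 : Nat) : Int)) labels []]
  rw [List.nil_append]
  apply List.map_congr_left
  intro x hx
  obtain ⟨hpw, hmem⟩ := bUniques_pairwise_mem labels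
  have hxu : x ∈ bUniques labels := (hmem x).mpr hx
  have hA : PySem.List.index? (bUniques labels) x = some (List.idxOf x (bUniques labels)) := by
    rw [PySem.List.index?_eq_idxOf?]
    exact idxOf?_eq_some_idxOf _ x hxu
  have hB := rank_get? (bUniques labels) 0 (PySem.Dict.mk ([] : List (Int × Int)))
    (hpw.imp fun h => ne_of_lt h) x hxu
  rw [hA]
  have hbu : (List.foldl (fun acc x => if acc.getLast? ≠ some x then acc ++ [x] else acc) []
      (PySem.List.sorted labels (fun x => x) false)) = bUniques labels := rfl
  rw [getD_eq_get?, hbu, hB]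
  simp
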